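-- pv_equiv track=rewrite | github.com/MSRCCS/Caffe | examples/yolo/convert_to_tsv.py | guess_phase
-- ===== SOURCE A (Python) =====
-- _valid_phases = ["train", "test", "val"]
--
-- def guess_phase(path):
--     """Guess the phase from path
--     :param path: file or directory path to guess the phase name from
--     :rtype str
--     """
--     for elem in reversed(path.replace("\\", "/").split("/")):
--         if not elem:
--             continue
--         elem_lower = elem.lower()
--         for name in _valid_phases:
--             if name in elem_lower:
--                 return elem
--     return ""
-- ===== SOURCE B (Python) =====
-- _keywords = ("train", "test", "val")
--
--
-- def _is_phase(comp):
--     if not comp: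
--         return False
--     low = comp.lower()
--     return any(k in low for k in _keywords)
--
--
-- def guess_phase(path):
--     """Guess the phase from path: single backward character scan, no replace/split;
--     both separator characters are recognized on the fly."""
--     buf = []  # chars of the current component, in reverse order
--     for ch in reversed(path):
--         if ch == "/" or ch == "\\":
--             comp = "".join(reversed(buf))
--             if _is_phase(comp):
--                 return comp
--             buf = []
--         else:
--             buf.append(ch)
--     comp = "".join(reversed(buf))
--     return comp if _is_phase(comp) else ""
-- ===== Notes on version B (the rewrite author's own statement) =====
-- stated objective: alternative
-- what changed: Instead of A's replace-backslashes/split-on-slash/scan-components-reversed pipeline, B makes a single backward character-level scan of the raw path, recognizing both separator characters on the fly and assembling the current component from a char buffer, returning the first (i.e. last) matching component; no normalized copy of the path and no list of components are ever built.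
import Mathlib
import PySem

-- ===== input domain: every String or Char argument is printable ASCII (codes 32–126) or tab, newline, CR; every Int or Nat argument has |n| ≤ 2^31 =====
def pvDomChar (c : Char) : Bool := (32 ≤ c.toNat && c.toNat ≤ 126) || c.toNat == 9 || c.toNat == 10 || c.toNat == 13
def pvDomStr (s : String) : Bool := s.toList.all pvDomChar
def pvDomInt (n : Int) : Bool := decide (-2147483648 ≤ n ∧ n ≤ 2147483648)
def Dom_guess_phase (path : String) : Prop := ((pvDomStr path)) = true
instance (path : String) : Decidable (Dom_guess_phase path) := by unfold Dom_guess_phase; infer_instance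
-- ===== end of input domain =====

-- B replaces A's replace/split/reversed-list pipeline by a single backward character
-- scan that treats '/' and '\' as separators on the fly (objective: alternative).

-- ===== PORT A =====
def pvPhases : List String := ["train", "test", "val"]

-- inner loop: 'for name in _valid_phases: if name in elem_lower: return elem'
def guessPhaseInner (names : List String) (elemLower : String) : Bool :=
  match names with
  | [] => false
  | n :: rest =>
      if PySem.Str.isIn n elemLower then true else guessPhaseInner rest elemLower

-- outer loop over the reversed components, early return
def guessPhaseLoop (elems : List String) : String :=
  match elems with
  | [] => ""
  | e :: rest =>
      if e = "" then guessPhaseLoop rest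
      else if guessPhaseInner pvPhases (PySem.Str.lower e) then e
      else guessPhaseLoop rest

def guess_phase (path : String) : String :=
  guessPhaseLoop (((PySem.Str.split? (PySem.Str.replace path "\\" "/") "/").getD []).reverse)

-- ===== PORT B =====
-- Source B's _is_phase: 'if not comp: return False; low = comp.lower(); return any(k in low …)'
def pvIsPhase (comp : List Char) : Bool :=
  if comp.isEmpty then false
  else
    PySem.Chars.isIn "train".toList (PySem.Chars.lower comp) ||
    PySem.Chars.isIn "test".toList (PySem.Chars.lower comp) ||
    PySem.Chars.isIn "val".toList (PySem.Chars.lower comp)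

-- Source B's loop body: 'for ch in reversed(path): …'; buf holds the current component's
-- chars in reverse order, ''.join(reversed(buf)) is buf.reverse as a string
def guessPhaseAltGo (buf : List Char) : List Char → String
  | [] => if pvIsPhase buf.reverse then String.ofList buf.reverse else ""
  | c :: rest =>
      if c = '/' || c = '\\' then
        (if pvIsPhase buf.reverse then String.ofList buf.reverse else guessPhaseAltGo [] rest)
      else guessPhaseAltGo (buf ++ [c]) rest

def guess_phase_alt (path : String) : String :=
  guessPhaseAltGo [] path.toList.reverse

-- ===== PRECONDITION & SPEC =====
def Spec_guess_phase (path : String) (out : String) : Prop := out = guess_phase_alt path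
instance (path : String) (out : String) : Decidable (Spec_guess_phase path out) := by unfold Spec_guess_phase; infer_instance

-- ===== CLAIM (what is proved, stated in full; the proofs are below) =====
def Claim_equal_guess_phase : Prop := ∀ (path : String), Dom_guess_phase path → Spec_guess_phase path (guess_phase path)

-- ===== LEMMAS AND PROOFS =====

-- separator test of the normalized path, and the char map performed by A's replace
def pvIsSep (c : Char) : Bool := c = '/' || c = '\\'
def pvF (c : Char) : Char := if c = '\\' then '/' else c

-- proof-side splitter: components of cs with seps '/','\\'; cur is the reversed open component
def pvParts (cur : List Char) : List Char → List (List Char)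
  | [] => [cur.reverse]
  | c :: t => if pvIsSep c then cur.reverse :: pvParts [] t else pvParts (c :: cur) t

def pvHitC (p : List Char) : Bool :=
  PySem.Chars.isIn "train".toList (PySem.Chars.lower p) ||
  PySem.Chars.isIn "test".toList (PySem.Chars.lower p) ||
  PySem.Chars.isIn "val".toList (PySem.Chars.lower p)

-- reversed scan over char-level components (common reference form)
def pvLoopP : List (List Char) → String
  | [] => ""
  | p :: rest => if !p.isEmpty && pvHitC p then String.ofList p else pvLoopP rest

theorem replace_go_eq (cs : List Char) : ∀ (fuel : Nat) (acc : List Char), cs.length ≤ fuel →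
    PySem.Chars.replace.go ['\\'] ['/'] fuel cs acc = acc.reverse ++ cs.map pvF := by
  induction cs with
  | nil =>
      intro fuel acc _
      cases fuel <;> simp [PySem.Chars.replace.go]
  | cons c t ih =>
      intro fuel acc hle
      cases fuel with
      | zero => simp at hle
      | succ f =>
          have hle' : t.length ≤ f := by simpa using hle
          by_cases hc : c = '\\'
          · subst hc
            rw [PySem.Chars.replace.go]
            simp only [List.isPrefixOf, BEq.rfl, Bool.true_and, List.isPrefixOf_nil_left,
              List.length_cons, List.length_nil, List.drop_succ_cons, List.drop_zero,
              List.reverse_cons, List.reverse_nil, List.nil_append, List.singleton_append]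
            rw [ih f ('/' :: acc) hle']
            simp [pvF]
          · rw [PySem.Chars.replace.go]
            have hpre : List.isPrefixOf ['\\'] (c :: t) = false := by
              simp [List.isPrefixOf, Ne.symm hc]
            rw [if_neg (by simp [hpre])]
            rw [ih f (c :: acc) hle']
            simp [pvF, hc]

theorem replace_eq (cs : List Char) :
    PySem.Chars.replace cs "\\".toList "/".toList = cs.map pvF := by
  have : ("\\".toList) = ['\\'] := by decide
  rw [PySem.Chars.replace]
  simp only [this]
  simpa using replace_go_eq cs cs.length [] le_rfl

theorem split_go_eq (cs : List Char) : ∀ (fuel : Nat) (cur : List Char) (acc : List (List Char)),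
    cs.length ≤ fuel →
    PySem.Chars.splitOn.go ['/'] fuel (cs.map pvF) cur acc = acc.reverse ++ pvParts cur cs := by
  induction cs with
  | nil =>
      intro fuel cur acc _
      cases fuel <;> simp [PySem.Chars.splitOn.go, pvParts]
  | cons c t ih =>
      intro fuel cur acc hle
      cases fuel with
      | zero => simp at hle
      | succ f =>
          have hle' : t.length ≤ f := by simpa using hle
          by_cases hs : pvIsSep c = true
          · have hf : pvF c = '/' := by
              rcases (by simpa [pvIsSep] using hs : c = '/' ∨ c = '\\') with h | h <;>
                simp [pvF, h]
            rw [List.map_cons, hf, PySem.Chars.splitOn.go]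
            simp only [List.isPrefixOf, BEq.rfl, Bool.true_and, List.isPrefixOf_nil_left,
              List.length_cons, List.length_nil, List.drop_succ_cons, List.drop_zero]
            rw [ih f [] (cur.reverse :: acc) hle']
            simp [pvParts, hs]
          · have hcs : ¬ (c = '/' ∨ c = '\\') := by simpa [pvIsSep] using hs
            have hf : pvF c = c := by unfold pvF; rw [if_neg (fun h => hcs (Or.inr h))]
            have hne : ('/' : Char) ≠ pvF c := by
              rw [hf]; exact fun h => hcs (Or.inl h.symm)
            rw [List.map_cons, PySem.Chars.splitOn.go]
            have hpre : List.isPrefixOf ['/'] (pvF c :: t.map pvF) = false := by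
              simp [List.isPrefixOf, hne]
            rw [if_neg (by simp [hpre])]
            rw [ih f (pvF c :: cur) acc hle']
            simp [pvParts, hs, hf]

theorem splitOn_eq (cs : List Char) :
    PySem.Chars.splitOn (cs.map pvF) "/".toList = pvParts [] cs := by
  have : ("/".toList) = ['/'] := by decide
  rw [PySem.Chars.splitOn, this]
  simpa using split_go_eq cs ((cs.map pvF).length + 1) [] [] (by simp)

theorem parts_no_sep (comp : List Char) (h : ∀ c ∈ comp, pvIsSep c = false) :
    ∀ cur, pvParts cur comp = [cur.reverse ++ comp] := by
  induction comp with
  | nil => intro cur; simp [pvParts]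
  | cons c t ih =>
      intro cur
      have hc : pvIsSep c = false := h c (by simp)
      rw [pvParts, if_neg (by simp [hc])]
      rw [ih (fun d hd => h d (by simp [hd])) (c :: cur)]
      simp

theorem parts_append_sep (xs : List Char) (c : Char) (hc : pvIsSep c = true) (ys : List Char) :
    ∀ cur, pvParts cur (xs ++ c :: ys) = pvParts cur xs ++ pvParts [] ys := by
  induction xs with
  | nil => intro cur; simp [pvParts, hc]
  | cons x t ih =>
      intro cur
      by_cases hx : pvIsSep x = true
      · simp [pvParts, hx, ih]
      · simp [pvParts, hx, ih]

theorem isPhase_eq (comp : List Char) : pvIsPhase comp = (!comp.isEmpty && pvHitC comp) := by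
  by_cases h : comp.isEmpty <;> simp [pvIsPhase, pvHitC, h]

theorem bGo_eq (ds : List Char) : ∀ (buf : List Char), (∀ c ∈ buf, pvIsSep c = false) →
    guessPhaseAltGo buf ds = pvLoopP ((pvParts [] (ds.reverse ++ buf.reverse)).reverse) := by
  induction ds with
  | nil =>
      intro buf h
      rw [guessPhaseAltGo]
      have := parts_no_sep buf.reverse (fun c hc => h c (List.mem_reverse.mp hc)) []
      simp only [List.reverse_nil, List.nil_append] at this ⊢
      rw [this]
      simp [pvLoopP, isPhase_eq]
  | cons c rest ih =>
      intro buf h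
      by_cases hs : pvIsSep c = true
      · rw [guessPhaseAltGo, if_pos (by simpa [pvIsSep] using hs)]
        have harg : (c :: rest).reverse ++ buf.reverse = rest.reverse ++ c :: buf.reverse := by
          simp
        rw [harg, parts_append_sep rest.reverse c hs buf.reverse []]
        have hcomp := parts_no_sep buf.reverse (fun d hd => h d (List.mem_reverse.mp hd)) []
        simp only [List.reverse_nil, List.nil_append] at hcomp
        rw [hcomp]
        rw [List.reverse_append, List.reverse_singleton, List.singleton_append]
        rw [pvLoopP, ← isPhase_eq]
        by_cases hp : pvIsPhase buf.reverse = true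
        · simp [hp]
        · rw [if_neg (by simpa using hp), if_neg (by simpa using hp)]
          have := ih [] (by simp)
          simpa using this
      · rw [guessPhaseAltGo, if_neg (by simpa [pvIsSep] using hs)]
        have harg : (c :: rest).reverse ++ buf.reverse = rest.reverse ++ (buf ++ [c]).reverse := by
          simp
        rw [harg]
        exact ih (buf ++ [c]) (by
          intro d hd
          rcases List.mem_append.mp hd with hd | hd
          · exact h d hd
          · rcases List.mem_singleton.mp hd with rfl
            simpa using hs)

theorem inner_eq (le : String) :
    guessPhaseInner pvPhases le =
      (PySem.Str.isIn "train" le || PySem.Str.isIn "test" le || PySem.Str.isIn "val" le) := by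
  simp [guessPhaseInner, pvPhases, Bool.if_true_left, Bool.or_assoc]

theorem loopA_eq (ps : List (List Char)) :
    guessPhaseLoop (ps.map String.ofList) = pvLoopP ps := by
  induction ps with
  | nil => simp [guessPhaseLoop, pvLoopP]
  | cons p t ih =>
      by_cases hp : p = []
      · subst hp
        have h0 : String.ofList ([] : List Char) = "" := by decide
        simp [guessPhaseLoop, pvLoopP, h0, ih]
      · have hne : String.ofList p ≠ "" := fun he => hp (by simpa using congrArg String.toList he)
        rw [List.map_cons, guessPhaseLoop, if_neg hne, inner_eq]
        have hh : (PySem.Str.isIn "train" (PySem.Str.lower (String.ofList p)) ||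
            PySem.Str.isIn "test" (PySem.Str.lower (String.ofList p)) ||
            PySem.Str.isIn "val" (PySem.Str.lower (String.ofList p))) = pvHitC p := by
          simp [PySem.Str.isIn_eq, PySem.Str.toList_lower, pvHitC]
        rw [hh, pvLoopP]
        have hne' : (!p.isEmpty) = true := by simpa using hp
        rw [hne', Bool.true_and]
        cases h : pvHitC p <;> simp [ih]

-- ===== VERDICT (by name: the statement is the Claim_ definition above) =====
theorem guess_phase_spec : Claim_equal_guess_phase := by
  intro path _
  unfold Spec_guess_phase guess_phase guess_phase_alt
  rw [PySem.Str.split?, PySem.Chars.split?]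
  rw [if_neg (by decide)]
  rw [PySem.Str.toList_replace, replace_eq, splitOn_eq]
  simp only [Option.map_some, Option.getD_some, ← List.map_reverse]
  rw [loopA_eq]
  have := bGo_eq path.toList.reverse [] (by simp)
  simpa using this.symm
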